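-- pv_equiv track=rewrite | github.com/sweaty99/maximum-information-a-system-of-routers-can-transfer-from-one-source-to-one-target | a5.py | newlinks
-- ===== SOURCE A (Python) =====
-- def newlinks(links):
--     ans = {}
--     for (a,b,c) in links :
--         ans[(a,b)]=0
--         ans[(b,a)]=0
--     for (a,b,c) in links :
--         ans[(a,b)]=min(c,ans[(a,b)])
--         ans[(b,a)]= ans[(a,b)]
--
--     return list(ans.items())
-- ===== SOURCE B (Python) =====
-- def newlinks(links):
--     # Dedup the oriented keys in first-appearance order, then for each key compute
--     # its value directly by a full scan: min of 0 and every capacity of a link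
--     # touching that pair in either orientation. No running dict of values at all.
--     keys = []
--     seen = set()
--     for (a, b, c) in links:
--         for k in ((a, b), (b, a)):
--             if k not in seen:
--                 seen.add(k)
--                 keys.append(k)
--     return [(k, min([0] + [c for (a, b, c) in links if (a, b) == k or (b, a) == k]))
--             for k in keys]
-- ===== Notes on version B (the rewrite author's own statement) =====
-- stated objective: alternative
-- what changed: B abandons A's incremental dict of running minima entirely: it first dedups the oriented keys in first-appearance order with a list+set, then computes each key's value independently by a full scan over links (min of 0 and all capacities touching that undirected pair), trading A's O(n) coupled dict updates for an O(n^2) scan per key with no value dict at all.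
import Mathlib
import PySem

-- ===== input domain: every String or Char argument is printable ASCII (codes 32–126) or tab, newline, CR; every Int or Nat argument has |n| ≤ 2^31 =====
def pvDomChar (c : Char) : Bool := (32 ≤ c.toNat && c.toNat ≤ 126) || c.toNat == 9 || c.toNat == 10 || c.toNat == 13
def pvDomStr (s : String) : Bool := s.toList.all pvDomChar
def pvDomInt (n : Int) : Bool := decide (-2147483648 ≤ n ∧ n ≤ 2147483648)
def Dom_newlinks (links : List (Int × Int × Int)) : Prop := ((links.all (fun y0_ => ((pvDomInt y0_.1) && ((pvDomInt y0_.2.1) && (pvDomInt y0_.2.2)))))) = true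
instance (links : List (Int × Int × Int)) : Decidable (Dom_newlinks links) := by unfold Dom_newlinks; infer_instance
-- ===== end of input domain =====

-- B replaces A's incremental dict of running minima by: dedup the oriented keys in
-- first-appearance order, then compute each key's value independently by a full scan
-- over links (objective: alternative — no value dict at all).

-- ===== PORT A =====
def newlinks (links : List (Int × Int × Int)) : List ((Int × Int) × Int) :=
  let ans : PySem.Dict (Int × Int) Int :=
    links.foldl (fun d t =>
      match t with
      | (a, b, _) => (d.insert (a, b) 0).insert (b, a) 0) PySem.Dict.empty
  let ans :=
    links.foldl (fun d t =>
      match t with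
      | (a, b, c) =>
        let d := d.insert (a, b) (min c (d.getD (a, b) 0))
        d.insert (b, a) (d.getD (a, b) 0)) ans
  ans.items

-- ===== PORT B =====
-- min([0] + [c for …]) is ported as a fold of min over the comprehension starting at 0.
def newlinks_alt (links : List (Int × Int × Int)) : List ((Int × Int) × Int) :=
  let st : List (Int × Int) × PySem.Set (Int × Int) :=
    links.foldl (fun st t =>
      match t with
      | (a, b, _) =>
        let st := if st.2.contains (a, b) then st else (st.1 ++ [(a, b)], st.2.add (a, b))
        if st.2.contains (b, a) then st else (st.1 ++ [(b, a)], st.2.add (b, a))) ([], PySem.Set.empty)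
  st.1.map (fun k =>
    (k, (links.filterMap (fun t =>
          if (t.1, t.2.1) = k ∨ (t.2.1, t.1) = k then some t.2.2 else none)).foldl min 0))

-- ===== PRECONDITION & SPEC =====
def Spec_newlinks (links : List (Int × Int × Int)) (out : List ((Int × Int) × Int)) : Prop := out = newlinks_alt links
instance (links : List (Int × Int × Int)) (out : List ((Int × Int) × Int)) : Decidable (Spec_newlinks links out) := by unfold Spec_newlinks; infer_instance

-- ===== CLAIM (what is proved, stated in full; the proofs are below) =====
def Claim_equal_newlinks : Prop := ∀ (links : List (Int × Int × Int)), Dom_newlinks links → Spec_newlinks links (newlinks links)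

-- ===== LEMMAS AND PROOFS =====

-- the running minimum key p accumulates over a list of links, starting from v
def mvalAux (l : List (Int × Int × Int)) (p : Int × Int) (v : Int) : Int :=
  l.foldl (fun v t => if p = (t.1, t.2.1) ∨ p = (t.2.1, t.1) then min t.2.2 v else v) v

-- generic "insert both orientations of each link" loop; value may depend on the running dict
def pairfold (v : PySem.Dict (Int × Int) Int → Int × Int × Int → Int)
    (l : List (Int × Int × Int)) (d : PySem.Dict (Int × Int) Int) : PySem.Dict (Int × Int) Int :=
  l.foldl (fun d t => (d.insert (t.1, t.2.1) (v d t)).insert (t.2.1, t.1) (v d t)) d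

-- append-if-absent on a key list, and the key list its iteration over links produces
def addk (ks : List (Int × Int)) (k : Int × Int) : List (Int × Int) :=
  if k ∈ ks then ks else ks ++ [k]

def keysOf (l : List (Int × Int × Int)) (ks : List (Int × Int)) : List (Int × Int) :=
  l.foldl (fun ks t => addk (addk ks (t.1, t.2.1)) (t.2.1, t.1)) ks

theorem keys_insert_eq (d : PySem.Dict (Int × Int) Int) (k : Int × Int) (v : Int) :
    (d.insert k v).keys = addk d.keys k := by
  unfold addk
  by_cases h : k ∈ d.keys
  · rw [if_pos h, PySem.Dict.keys_insert_of_contains]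
    exact (PySem.Dict.contains_iff_mem_keys d k).mpr h
  · rw [if_neg h, PySem.Dict.keys_insert_of_not_contains]
    simpa using (fun hc => h ((PySem.Dict.contains_iff_mem_keys d k).mp hc))

-- keys of any pairfold are keysOf of the starting keys, independent of the values
theorem pairfold_keys (v : PySem.Dict (Int × Int) Int → Int × Int × Int → Int)
    (l : List (Int × Int × Int)) (d : PySem.Dict (Int × Int) Int) :
    (pairfold v l d).keys = keysOf l d.keys := by
  induction l generalizing d with
  | nil => rfl
  | cons t l ih =>
    simp only [pairfold, keysOf, List.foldl_cons]
    rw [show (l.foldl (fun d t => (d.insert (t.1, t.2.1) (v d t)).insert (t.2.1, t.1) (v d t))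
        ((d.insert (t.1, t.2.1) (v d t)).insert (t.2.1, t.1) (v d t))) = pairfold v l _ from rfl,
      ih, keys_insert_eq, keys_insert_eq]
    rfl

theorem pairfold_nodup (v : PySem.Dict (Int × Int) Int → Int × Int × Int → Int)
    (l : List (Int × Int × Int)) (d : PySem.Dict (Int × Int) Int) (h : d.keys.Nodup) :
    (pairfold v l d).keys.Nodup := by
  induction l generalizing d with
  | nil => simpa [pairfold] using h
  | cons t l ih =>
    exact ih _ (PySem.Dict.nodup_keys_insert _ _ _ (PySem.Dict.nodup_keys_insert _ _ _ h))

-- A's first loop inserts only 0s, so every lookup of its result is 0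
theorem zero_pairfold (l : List (Int × Int × Int)) (d : PySem.Dict (Int × Int) Int)
    (h : ∀ p, d.getD p 0 = 0) (p : Int × Int) :
    (pairfold (fun _ _ => 0) l d).getD p 0 = 0 := by
  induction l generalizing d with
  | nil => exact h p
  | cons t l ih =>
    refine ih _ (fun q => ?_)
    rw [PySem.Dict.getD_insert, PySem.Dict.getD_insert]
    split_ifs <;> simp [h]

-- A's second loop: every lookup is the running minimum, provided the dict is orientation-symmetric
theorem a2_getD (l : List (Int × Int × Int)) (d : PySem.Dict (Int × Int) Int)
    (hsym : ∀ x y : Int, d.getD (x, y) 0 = d.getD (y, x) 0) (p : Int × Int) :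
    (l.foldl (fun d t =>
        match t with
        | (a, b, c) =>
          let d := d.insert (a, b) (min c (d.getD (a, b) 0))
          d.insert (b, a) (d.getD (a, b) 0)) d).getD p 0
      = mvalAux l p (d.getD p 0) := by
  induction l generalizing d with
  | nil => rfl
  | cons t l ih =>
    obtain ⟨a, b, c⟩ := t
    simp only [List.foldl_cons]
    set w := min c (d.getD (a, b) 0) with hw
    have hstep : ((d.insert (a, b) w).insert (b, a) ((d.insert (a, b) w).getD (a, b) 0))
        = (d.insert (a, b) w).insert (b, a) w := by
      rw [PySem.Dict.getD_insert_self]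
    have hval : ∀ q : Int × Int, ((d.insert (a, b) w).insert (b, a) w).getD q 0
        = if q = (a, b) ∨ q = (b, a) then min c (d.getD q 0) else d.getD q 0 := by
      intro q
      rw [PySem.Dict.getD_insert, PySem.Dict.getD_insert]
      by_cases h1 : q = (b, a)
      · subst h1
        rw [if_pos rfl, if_pos (Or.inr rfl), hw, hsym a b]
      · by_cases h2 : q = (a, b)
        · subst h2; simp [h1, hw]
        · simp [h1, h2]
    have hsym' : ∀ x y : Int, ((d.insert (a, b) w).insert (b, a) w).getD (x, y) 0
        = ((d.insert (a, b) w).insert (b, a) w).getD (y, x) 0 := by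
      intro x y
      rw [hval, hval]
      have hiff : ((x, y) = (a, b) ∨ (x, y) = (b, a)) ↔ ((y, x) = (a, b) ∨ (y, x) = (b, a)) := by
        simp only [Prod.mk.injEq]
        constructor <;> (intro h; rcases h with ⟨h1, h2⟩ | ⟨h1, h2⟩ <;> omega)
      by_cases h : (x, y) = (a, b) ∨ (x, y) = (b, a)
      · rw [if_pos h, if_pos (hiff.mp h), hsym x y]
      · rw [if_neg h, if_neg (fun hc => h (hiff.mpr hc)), hsym x y]
    show ((l.foldl _ ((d.insert (a, b) w).insert (b, a) ((d.insert (a, b) w).getD (a, b) 0)))).getD p 0 = _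
    rw [hstep, ih _ hsym', hval p]
    rfl

-- A's first loop is a pairfold (definitional)
theorem a1_eq_pairfold (l : List (Int × Int × Int)) (d : PySem.Dict (Int × Int) Int) :
    l.foldl (fun d t => match t with
      | (a, b, _) => (d.insert (a, b) 0).insert (b, a) 0) d
    = pairfold (fun _ _ => 0) l d := rfl

-- A's second loop is a pairfold too (the second insert re-reads the value just written)
theorem a2_eq_pairfold (l : List (Int × Int × Int)) (d : PySem.Dict (Int × Int) Int) :
    l.foldl (fun d t => match t with
      | (a, b, c) =>
        let d := d.insert (a, b) (min c (d.getD (a, b) 0))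
        d.insert (b, a) (d.getD (a, b) 0)) d
    = pairfold (fun d t => min t.2.2 (d.getD (t.1, t.2.1) 0)) l d := by
  induction l generalizing d with
  | nil => rfl
  | cons t l ih =>
    obtain ⟨a, b, c⟩ := t
    show (l.foldl _ ((d.insert (a, b) _).insert (b, a)
        ((d.insert (a, b) (min c (d.getD (a, b) 0))).getD (a, b) 0))) = pairfold _ l _
    rw [PySem.Dict.getD_insert_self]
    exact ih _

-- membership facts about addk / keysOf
theorem mem_addk (ks : List (Int × Int)) (k p : Int × Int) (h : p ∈ ks) : p ∈ addk ks k := by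
  unfold addk; split_ifs <;> simp [h]

theorem mem_addk_self (ks : List (Int × Int)) (k : Int × Int) : k ∈ addk ks k := by
  unfold addk; split_ifs with h <;> simp [h]

theorem keysOf_mono (l : List (Int × Int × Int)) (ks : List (Int × Int)) (p : Int × Int)
    (h : p ∈ ks) : p ∈ keysOf l ks := by
  induction l generalizing ks with
  | nil => exact h
  | cons t l ih => exact ih _ (mem_addk _ _ _ (mem_addk _ _ _ h))

theorem keysOf_mem (l : List (Int × Int × Int)) (ks : List (Int × Int)) (t : Int × Int × Int)
    (ht : t ∈ l) : (t.1, t.2.1) ∈ keysOf l ks ∧ (t.2.1, t.1) ∈ keysOf l ks := by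
  induction l generalizing ks with
  | nil => cases ht
  | cons s l ih =>
    rcases List.mem_cons.mp ht with h | h
    · subst h
      refine ⟨keysOf_mono l (addk (addk ks (t.1, t.2.1)) (t.2.1, t.1)) _ ?_,
        keysOf_mono l (addk (addk ks (t.1, t.2.1)) (t.2.1, t.1)) _ ?_⟩
      · exact mem_addk _ _ _ (mem_addk_self _ _)
      · exact mem_addk_self _ _
    · exact ih _ h

theorem keysOf_stable (l : List (Int × Int × Int)) (ks : List (Int × Int))
    (h : ∀ t ∈ l, (t.1, t.2.1) ∈ ks ∧ (t.2.1, t.1) ∈ ks) : keysOf l ks = ks := by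
  induction l with
  | nil => rfl
  | cons t l ih =>
    have h1 := (h t (List.mem_cons_self ..)).1
    have h2 := (h t (List.mem_cons_self ..)).2
    have hk : addk (addk ks (t.1, t.2.1)) (t.2.1, t.1) = ks := by
      simp [addk, h1, h2]
    show keysOf l (addk (addk ks (t.1, t.2.1)) (t.2.1, t.1)) = ks
    rw [hk]
    exact ih (fun s hs => h s (List.mem_cons_of_mem _ hs))

-- one step of B's key-collecting loop keeps list and set equal, evolving by addk
theorem b_step_diag (ks : List (Int × Int)) (a b : Int) :
    (let st := if (PySem.Set.contains ks (a, b)) then ((ks, ks) : List (Int × Int) × PySem.Set (Int × Int))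
               else (ks ++ [(a, b)], PySem.Set.add ks (a, b))
     if st.2.contains (b, a) then st else (st.1 ++ [(b, a)], st.2.add (b, a)))
    = (addk (addk ks (a, b)) (b, a), addk (addk ks (a, b)) (b, a)) := by
  by_cases h1 : (a, b) ∈ ks <;>
    by_cases h2 : (b, a) ∈ addk ks (a, b) <;>
    simp_all [PySem.Set.contains, PySem.Set.add, addk]

-- B's key-collecting loop stays diagonal: list and set are the same list, evolving by addk
theorem b_keys_fold (l : List (Int × Int × Int)) (ks : List (Int × Int)) :
    (l.foldl (fun st t =>
      match t with
      | (a, b, _) =>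
        let st := if st.2.contains (a, b) then st else (st.1 ++ [(a, b)], st.2.add (a, b))
        if st.2.contains (b, a) then st else (st.1 ++ [(b, a)], st.2.add (b, a)))
      ((ks, ks) : List (Int × Int) × PySem.Set (Int × Int)))
    = (keysOf l ks, keysOf l ks) := by
  induction l generalizing ks with
  | nil => rfl
  | cons t l ih =>
    obtain ⟨a, b, c⟩ := t
    rw [List.foldl_cons]
    show (l.foldl _ (let st := if (PySem.Set.contains ks (a, b)) then ((ks, ks) : List (Int × Int) × PySem.Set (Int × Int))
               else (ks ++ [(a, b)], PySem.Set.add ks (a, b))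
     if st.2.contains (b, a) then st else (st.1 ++ [(b, a)], st.2.add (b, a)))) = _
    rw [b_step_diag]
    exact ih _

-- B's per-key scan computes the running minimum
theorem b_val (l : List (Int × Int × Int)) (k : Int × Int) (v : Int) :
    (l.filterMap (fun t =>
        if (t.1, t.2.1) = k ∨ (t.2.1, t.1) = k then some t.2.2 else none)).foldl min v
      = mvalAux l k v := by
  induction l generalizing v with
  | nil => rfl
  | cons t l ih =>
    obtain ⟨a, b, c⟩ := t
    simp only [List.filterMap_cons, mvalAux, List.foldl_cons]
    have hiff : ((a, b) = k ∨ (b, a) = k) ↔ (k = (a, b) ∨ k = (b, a)) := by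
      constructor <;> (intro h; rcases h with h | h <;> [exact Or.inl h.symm; exact Or.inr h.symm])
    by_cases h : (a, b) = k ∨ (b, a) = k
    · rw [if_pos h, if_pos (hiff.mp h), List.foldl_cons, min_comm c v]
      exact ih (min v c)
    · rw [if_neg h, if_neg (fun hc => h (hiff.mpr hc))]
      exact ih v

theorem newlinks_eq_alt (links : List (Int × Int × Int)) :
    newlinks links = newlinks_alt links := by
  simp only [newlinks, newlinks_alt]
  rw [a1_eq_pairfold, a2_eq_pairfold]
  have hempty : (PySem.Set.empty : PySem.Set (Int × Int)) = ([] : List (Int × Int)) := rfl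
  rw [hempty, b_keys_fold]
  set d1 : PySem.Dict (Int × Int) Int := pairfold (fun _ _ => 0) links PySem.Dict.empty with hd1def
  have hd1 : ∀ p : Int × Int, d1.getD p 0 = 0 := by
    intro p
    exact zero_pairfold links PySem.Dict.empty (fun q => by simp [PySem.Dict.getD_empty]) p
  have hA : ∀ p : Int × Int,
      (pairfold (fun d t => min t.2.2 (d.getD (t.1, t.2.1) 0)) links d1).getD p 0
        = mvalAux links p 0 := by
    intro p
    have h := a2_getD links d1 (fun x y => by rw [hd1, hd1]) p
    rw [a2_eq_pairfold] at h
    rw [h, hd1 p]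
  have hnodempty : (PySem.Dict.empty : PySem.Dict (Int × Int) Int).keys.Nodup := by
    simp [PySem.Dict.keys_empty]
  have hnodA : (pairfold (fun d t => min t.2.2 (d.getD (t.1, t.2.1) 0)) links d1).keys.Nodup := by
    rw [pairfold_keys]
    have := pairfold_nodup (fun d t => min t.2.2 (d.getD (t.1, t.2.1) 0)) links d1
      (pairfold_nodup _ links PySem.Dict.empty hnodempty)
    rwa [pairfold_keys] at this
  have hkeys : (pairfold (fun d t => min t.2.2 (d.getD (t.1, t.2.1) 0)) links d1).keys
      = keysOf links [] := by
    rw [pairfold_keys, hd1def, pairfold_keys, PySem.Dict.keys_empty]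
    exact keysOf_stable links _ (fun t ht => keysOf_mem links [] t ht)
  rw [PySem.Dict.items_eq_map_keys _ hnodA 0, hkeys]
  apply List.map_congr_left
  intro k hk
  rw [hA k, b_val]

-- ===== VERDICT (by name: the statement is the Claim_ definition above) =====
theorem newlinks_spec : Claim_equal_newlinks := by
  intro links _
  show newlinks links = newlinks_alt links
  exact newlinks_eq_alt links
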